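-- pv_equiv track=rewrite | github.com/hmin0503/2019 | Programmers/Practice_for_Codingtest/Exhaustive_Search/Exhaustive_Search_1.py | solution
-- ===== SOURCE A (Python) =====
-- def solution(answers):
--     answer = []
--     A = [1,2,3,4,5]
--     B = [2,1,2,3,2,4,2,5]
--     C = [3,3,1,1,2,2,4,4,5,5]
--     score = [0,0,0]
--     for i in range(len(answers)):
--         a = i % 5
--         b = i % 8
--         c = i % 10
--         if A[a] == answers[i] :
--             score[0] += 1
--         if B[b] == answers[i] :
--             score[1] += 1
--         if C[c] == answers[i] :
--             score[2] += 1
--     top = max(score)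
--     for i in range(len(score)):
--         if score[i] >= top :
--             answer.append(i+1)
--
--     return answer
-- ===== SOURCE B (Python) =====
-- _A = [1, 2, 3, 4, 5]
-- _B = [2, 1, 2, 3, 2, 4, 2, 5]
-- _C = [3, 3, 1, 1, 2, 2, 4, 4, 5, 5]
-- # All three guess sequences repeat with period lcm(5, 8, 10) = 40:
-- # precompute the three guesses for each residue class of the position.
-- _TABLE = [(_A[r % 5], _B[r % 8], _C[r % 10]) for r in range(40)]
--
--
-- def solution(answers):
--     # Histogram the test: one bucket per distinct (position mod 40, answer) pair.
--     hist = {}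
--     for i, ans in enumerate(answers):
--         key = (i % 40, ans)
--         hist[key] = hist.get(key, 0) + 1
--     # Score each supo from the buckets via the precomputed guess table.
--     sA = sB = sC = 0
--     for (r, ans), cnt in hist.items():
--         gA, gB, gC = _TABLE[r]
--         if gA == ans:
--             sA += cnt
--         if gB == ans:
--             sB += cnt
--         if gC == ans:
--             sC += cnt
--     score = [sA, sB, sC]
--     top = max(score)
--     return [k + 1 for k in range(3) if score[k] >= top]
-- ===== Notes on version B (the rewrite author's own statement) =====
-- stated objective: alternative
-- what changed: Instead of A's single indexed loop testing each position against three modular patterns, B precomputes a 40-entry guess table (period lcm(5,8,10)), aggregates the answers into a histogram keyed by (position mod 40, answer), and scores each supo by summing bucket counts against the table before picking the winners.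
import Mathlib
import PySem

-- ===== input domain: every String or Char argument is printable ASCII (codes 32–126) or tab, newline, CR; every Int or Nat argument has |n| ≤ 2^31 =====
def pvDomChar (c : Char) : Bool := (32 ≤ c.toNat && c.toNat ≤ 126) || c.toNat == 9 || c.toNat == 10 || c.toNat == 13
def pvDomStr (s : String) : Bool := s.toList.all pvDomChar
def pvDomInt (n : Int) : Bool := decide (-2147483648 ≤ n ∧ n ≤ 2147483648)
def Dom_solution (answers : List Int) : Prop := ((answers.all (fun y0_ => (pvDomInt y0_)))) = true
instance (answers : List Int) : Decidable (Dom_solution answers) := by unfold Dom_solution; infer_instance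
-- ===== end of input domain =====

-- B replaces A's single indexed loop over three modular patterns by a precomputed
-- 40-entry guess table (period lcm(5,8,10)) plus a histogram of the answers keyed
-- by (position mod 40, answer); scores are summed from the buckets (objective:
-- alternative algorithm/data structure, same asymptotic cost).

-- ===== PORT A =====
def solution (answers : List Int) : List Int :=
  let A : List Int := [1, 2, 3, 4, 5]
  let B : List Int := [2, 1, 2, 3, 2, 4, 2, 5]
  let C : List Int := [3, 3, 1, 1, 2, 2, 4, 4, 5, 5]
  let score :=
    (PySem.List.pyRange 0 (answers.length : Int) 1).foldl
      (fun (s : Int × Int × Int) i =>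
        let a := PySem.Int.mod i 5
        let b := PySem.Int.mod i 8
        let c := PySem.Int.mod i 10
        let v := PySem.List.pyGetD answers i 0
        let s0 := if PySem.List.pyGetD A a 0 = v then s.1 + 1 else s.1
        let s1 := if PySem.List.pyGetD B b 0 = v then s.2.1 + 1 else s.2.1
        let s2 := if PySem.List.pyGetD C c 0 = v then s.2.2 + 1 else s.2.2
        (s0, s1, s2)) (0, 0, 0)
  let top := max score.1 (max score.2.1 score.2.2)
  -- for i in range(len(score)): if score[i] >= top: answer.append(i+1)
  (if score.1 ≥ top then [(1 : Int)] else []) ++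
  (if score.2.1 ≥ top then [(2 : Int)] else []) ++
  (if score.2.2 ≥ top then [(3 : Int)] else [])

-- ===== PORT B =====
-- _TABLE = [(_A[r % 5], _B[r % 8], _C[r % 10]) for r in range(40)]
def pvTable : List (Int × Int × Int) :=
  (PySem.List.pyRange 0 40 1).map (fun r =>
    (PySem.List.pyGetD ([1, 2, 3, 4, 5] : List Int) (PySem.Int.mod r 5) 0,
     PySem.List.pyGetD ([2, 1, 2, 3, 2, 4, 2, 5] : List Int) (PySem.Int.mod r 8) 0,
     PySem.List.pyGetD ([3, 3, 1, 1, 2, 2, 4, 4, 5, 5] : List Int) (PySem.Int.mod r 10) 0))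

def solution_alt (answers : List Int) : List Int :=
  -- histogram: hist[(i % 40, ans)] = hist.get(key, 0) + 1
  let hist := (PySem.List.enumerate answers).foldl
      (fun (d : PySem.Dict (Int × Int) Int) ia =>
        let key := (PySem.Int.mod ia.1 40, ia.2)
        d.insert key (d.getD key 0 + 1)) PySem.Dict.empty
  -- score each supo from the buckets via the table
  let s := hist.items.foldl
      (fun (s : Int × Int × Int) kv =>
        let g := PySem.List.pyGetD pvTable kv.1.1 (0, 0, 0)
        (if g.1 = kv.1.2 then s.1 + kv.2 else s.1,
         if g.2.1 = kv.1.2 then s.2.1 + kv.2 else s.2.1,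
         if g.2.2 = kv.1.2 then s.2.2 + kv.2 else s.2.2)) (0, 0, 0)
  let score : List Int := [s.1, s.2.1, s.2.2]
  let top := (PySem.List.max? score (fun x => x)).getD 0
  (PySem.List.pyRange 0 3 1).filterMap (fun k =>
    if PySem.List.pyGetD score k 0 ≥ top then some (k + 1) else none)

-- ===== PRECONDITION & SPEC =====
def Spec_solution (answers : List Int) (out : List Int) : Prop := out = solution_alt answers
instance (answers : List Int) (out : List Int) : Decidable (Spec_solution answers out) := by unfold Spec_solution; infer_instance

-- ===== CLAIM (what is proved, stated in full; the proofs are below) =====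
def Claim_equal_solution : Prop := ∀ (answers : List Int), Dom_solution answers → Spec_solution answers (solution answers)

-- ===== LEMMAS AND PROOFS =====

-- A's fused loop computes the three match counts over the enumerated answers.
lemma pv_fused_fold (l : List (Int × Int)) (s : Int × Int × Int) :
    l.foldl
      (fun (s : Int × Int × Int) (ia : Int × Int) =>
        let a := PySem.Int.mod ia.1 5
        let b := PySem.Int.mod ia.1 8
        let c := PySem.Int.mod ia.1 10
        let v := ia.2
        let s0 := if PySem.List.pyGetD ([1,2,3,4,5] : List Int) a 0 = v then s.1 + 1 else s.1
        let s1 := if PySem.List.pyGetD ([2,1,2,3,2,4,2,5] : List Int) b 0 = v then s.2.1 + 1 else s.2.1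
        let s2 := if PySem.List.pyGetD ([3,3,1,1,2,2,4,4,5,5] : List Int) c 0 = v then s.2.2 + 1 else s.2.2
        (s0, s1, s2)) s
    = (s.1 + (l.countP (fun ia => PySem.List.pyGetD ([1,2,3,4,5] : List Int) (PySem.Int.mod ia.1 5) 0 == ia.2) : Int),
       s.2.1 + (l.countP (fun ia => PySem.List.pyGetD ([2,1,2,3,2,4,2,5] : List Int) (PySem.Int.mod ia.1 8) 0 == ia.2) : Int),
       s.2.2 + (l.countP (fun ia => PySem.List.pyGetD ([3,3,1,1,2,2,4,4,5,5] : List Int) (PySem.Int.mod ia.1 10) 0 == ia.2) : Int)) := by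
  induction l generalizing s with
  | nil => simp
  | cons x t ih =>
    simp only [List.foldl_cons, List.countP_cons, ih]
    obtain ⟨s0, s1, s2⟩ := s
    simp only [beq_iff_eq]
    split_ifs <;> simp <;> omega

-- table lookup at a residue 0 ≤ r < 40
lemma pvTable_at (r : Int) (h0 : 0 ≤ r) (h1 : r < 40) :
    PySem.List.pyGetD pvTable r (0, 0, 0) =
      (PySem.List.pyGetD ([1,2,3,4,5] : List Int) (r % 5) 0,
       PySem.List.pyGetD ([2,1,2,3,2,4,2,5] : List Int) (r % 8) 0,
       PySem.List.pyGetD ([3,3,1,1,2,2,4,4,5,5] : List Int) (r % 10) 0) := by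
  interval_cases r <;> decide

-- table lookup at i % 40 equals A's three modular lookups, for every integer i
lemma pvTable_spec (i : Int) :
    PySem.List.pyGetD pvTable (PySem.Int.mod i 40) (0, 0, 0) =
      (PySem.List.pyGetD ([1,2,3,4,5] : List Int) (PySem.Int.mod i 5) 0,
       PySem.List.pyGetD ([2,1,2,3,2,4,2,5] : List Int) (PySem.Int.mod i 8) 0,
       PySem.List.pyGetD ([3,3,1,1,2,2,4,4,5,5] : List Int) (PySem.Int.mod i 10) 0) := by
  rw [PySem.Int.mod_eq_emod_of_pos (by norm_num), PySem.Int.mod_eq_emod_of_pos (by norm_num : (0:Int) < 5),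
      PySem.Int.mod_eq_emod_of_pos (by norm_num : (0:Int) < 8), PySem.Int.mod_eq_emod_of_pos (by norm_num : (0:Int) < 10)]
  rw [pvTable_at (i % 40) (Int.emod_nonneg i (by norm_num)) (Int.emod_lt_of_pos i (by norm_num))]
  rw [Int.emod_emod_of_dvd i (by norm_num : (5:Int) ∣ 40),
      Int.emod_emod_of_dvd i (by norm_num : (8:Int) ∣ 40),
      Int.emod_emod_of_dvd i (by norm_num : (10:Int) ∣ 40)]

-- B's bucket loop computes three sums over the item list.
lemma pv_items_fold (l : List ((Int × Int) × Int)) (s : Int × Int × Int) :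
    l.foldl
      (fun (s : Int × Int × Int) kv =>
        let g := PySem.List.pyGetD pvTable kv.1.1 (0, 0, 0)
        (if g.1 = kv.1.2 then s.1 + kv.2 else s.1,
         if g.2.1 = kv.1.2 then s.2.1 + kv.2 else s.2.1,
         if g.2.2 = kv.1.2 then s.2.2 + kv.2 else s.2.2)) s
    = (s.1 + (l.map (fun kv => if (PySem.List.pyGetD pvTable kv.1.1 (0,0,0)).1 = kv.1.2 then kv.2 else 0)).sum,
       s.2.1 + (l.map (fun kv => if (PySem.List.pyGetD pvTable kv.1.1 (0,0,0)).2.1 = kv.1.2 then kv.2 else 0)).sum,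
       s.2.2 + (l.map (fun kv => if (PySem.List.pyGetD pvTable kv.1.1 (0,0,0)).2.2 = kv.1.2 then kv.2 else 0)).sum) := by
  induction l generalizing s with
  | nil => simp
  | cons x t ih =>
    simp only [List.foldl_cons, List.map_cons, List.sum_cons, ih]
    obtain ⟨s0, s1, s2⟩ := s
    split_ifs <;> simp <;> omega

-- pulling an if-then-else out of a summed map
lemma pv_sum_ite (D : List (Int × Int)) (p : Int × Int → Prop) [DecidablePred p] (c : Int × Int → Nat) :
    (D.map (fun k => if p k then (c k : Int) else 0)).sum
      = (((D.filter (fun k => decide (p k))).map c).sum : Int) := by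
  induction D with
  | nil => simp
  | cons a D ih =>
    simp only [List.map_cons, List.sum_cons, List.filter_cons]
    by_cases h : p a
    · simp [h, ih]
    · simp [h, ih]

-- summing bucket counts against a predicate counts the matching elements of the key list
lemma pv_sum_count (L : List (Int × Int)) (p : Int × Int → Prop) [DecidablePred p] :
    ((PySem.Set.ofList L).map (fun k => if p k then (L.count k : Int) else 0)).sum
      = (L.countP (fun k => decide (p k)) : Int) := by
  rw [pv_sum_ite]
  have hperm : List.Perm ((PySem.Set.ofList L).filter (fun k => decide (p k)))
      (L.dedup.filter (fun k => decide (p k))) := by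
    apply List.Perm.filter
    rw [List.perm_ext_iff_of_nodup (PySem.Set.nodup_ofList L) L.nodup_dedup]
    intro a
    simp [PySem.Set.mem_ofList, List.mem_dedup]
  rw [(hperm.map _).sum_eq]
  have hcnt : ∀ k : Int × Int,
      @List.count _ instBEqProd k L = @List.count _ instBEqOfDecidableEq k L := by
    intro k
    rw [@List.count_eq_countP, @List.count_eq_countP]
    simp [beq_eq_decide]
  simp only [hcnt]
  exact_mod_cast congrArg (Nat.cast (R := Int))
    (List.sum_map_count_dedup_filter_eq_countP (fun k => decide (p k)) L)

-- shorthand for the three match counts (proof-only helpers)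
def pvCA (answers : List Int) : Int :=
  ((PySem.List.enumerate answers).countP
    (fun ia => PySem.List.pyGetD ([1,2,3,4,5] : List Int) (PySem.Int.mod ia.1 5) 0 == ia.2) : Int)
def pvCB (answers : List Int) : Int :=
  ((PySem.List.enumerate answers).countP
    (fun ia => PySem.List.pyGetD ([2,1,2,3,2,4,2,5] : List Int) (PySem.Int.mod ia.1 8) 0 == ia.2) : Int)
def pvCC (answers : List Int) : Int :=
  ((PySem.List.enumerate answers).countP
    (fun ia => PySem.List.pyGetD ([3,3,1,1,2,2,4,4,5,5] : List Int) (PySem.Int.mod ia.1 10) 0 == ia.2) : Int)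

-- A evaluates to the winner selection over the three counts
lemma pv_A_eval (answers : List Int) :
    solution answers =
      (if pvCA answers ≥ max (pvCA answers) (max (pvCB answers) (pvCC answers)) then [(1 : Int)] else []) ++
      (if pvCB answers ≥ max (pvCA answers) (max (pvCB answers) (pvCC answers)) then [(2 : Int)] else []) ++
      (if pvCC answers ≥ max (pvCA answers) (max (pvCB answers) (pvCC answers)) then [(3 : Int)] else []) := by
  simp only [solution]
  rw [show (PySem.List.pyRange 0 (answers.length : Int) 1).foldl _ ((0,0,0) : Int × Int × Int)
        = (PySem.List.enumerate answers).foldl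
            (fun (s : Int × Int × Int) (ia : Int × Int) =>
              let a := PySem.Int.mod ia.1 5
              let b := PySem.Int.mod ia.1 8
              let c := PySem.Int.mod ia.1 10
              let v := ia.2
              let s0 := if PySem.List.pyGetD ([1,2,3,4,5] : List Int) a 0 = v then s.1 + 1 else s.1
              let s1 := if PySem.List.pyGetD ([2,1,2,3,2,4,2,5] : List Int) b 0 = v then s.2.1 + 1 else s.2.1
              let s2 := if PySem.List.pyGetD ([3,3,1,1,2,2,4,4,5,5] : List Int) c 0 = v then s.2.2 + 1 else s.2.2
              (s0, s1, s2)) ((0,0,0) : Int × Int × Int) from ?_]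
  · rw [pv_fused_fold]
    simp only [pvCA, pvCB, pvCC, zero_add]
    try rfl
  · rw [PySem.List.enumerate_eq_map_pyRange (d := 0), List.foldl_map]
    simp [PySem.List.len]

-- B's histogram is the counter of the keyed position/answer list
lemma pv_hist_eq (answers : List Int) :
    (PySem.List.enumerate answers).foldl
      (fun (d : PySem.Dict (Int × Int) Int) (ia : Int × Int) =>
        let key := (PySem.Int.mod ia.1 40, ia.2)
        d.insert key (d.getD key 0 + 1)) PySem.Dict.empty
    = PySem.Dict.counter ((PySem.List.enumerate answers).map (fun ia => (PySem.Int.mod ia.1 40, ia.2))) := by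
  rw [← PySem.Dict.foldl_insert_getD_add_one_eq_counter, List.foldl_map]

-- the three predicates, == vs decide
lemma pv_pred_eq (xs : List Int) (m : Int) :
    (fun ia : Int × Int => decide (PySem.List.pyGetD xs (PySem.Int.mod ia.1 m) 0 = ia.2))
      = (fun ia : Int × Int => PySem.List.pyGetD xs (PySem.Int.mod ia.1 m) 0 == ia.2) := by
  funext ia
  exact (beq_eq_decide _ _).symm

-- B evaluates to the bucket-scored winner selection over the same three counts
lemma pv_B_eval (answers : List Int) :
    solution_alt answers =
      (PySem.List.pyRange 0 3 1).filterMap (fun k =>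
        if PySem.List.pyGetD [pvCA answers, pvCB answers, pvCC answers] k 0 ≥
            (PySem.List.max? [pvCA answers, pvCB answers, pvCC answers] (fun x => x)).getD 0
        then some (k + 1) else none) := by
  simp only [solution_alt]
  rw [pv_hist_eq, PySem.Dict.items_counter, pv_items_fold]
  simp only [List.map_map, Function.comp_def, zero_add]
  rw [pv_sum_count _ (fun k => (PySem.List.pyGetD pvTable k.1 (0,0,0)).1 = k.2),
      pv_sum_count _ (fun k => (PySem.List.pyGetD pvTable k.1 (0,0,0)).2.1 = k.2),
      pv_sum_count _ (fun k => (PySem.List.pyGetD pvTable k.1 (0,0,0)).2.2 = k.2)]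
  rw [List.countP_map, List.countP_map, List.countP_map]
  simp only [Function.comp_def, pvTable_spec, pv_pred_eq]
  simp only [pvCA, pvCB, pvCC]
  try rfl

-- the two winner-selection styles agree for any score triple
lemma pv_select (x y z : Int) :
    (if x ≥ max x (max y z) then [(1 : Int)] else []) ++
    (if y ≥ max x (max y z) then [(2 : Int)] else []) ++
    (if z ≥ max x (max y z) then [(3 : Int)] else [])
    = (PySem.List.pyRange 0 3 1).filterMap (fun k =>
        if PySem.List.pyGetD [x, y, z] k 0 ≥ (PySem.List.max? [x, y, z] (fun x => x)).getD 0
        then some (k + 1) else none) := by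
  have h3 : PySem.List.pyRange 0 3 1 = [0, 1, 2] := by decide
  rw [h3]
  simp only [List.filterMap_cons, List.filterMap_nil, PySem.List.max?_id_cons,
    List.foldl_cons, List.foldl_nil, Option.getD_some]
  norm_num [PySem.List.pyGetD, PySem.List.pyGet?, PySem.List.pyIdx?, show Int.toNat 2 = 2 from rfl,
    List.getElem_cons_succ, List.getElem_cons_zero]
  split_ifs <;> rfl

-- ===== VERDICT (by name: the statement is the Claim_ definition above) =====
theorem solution_spec : Claim_equal_solution := by
  intro answers _
  show solution answers = solution_alt answers
  rw [pv_A_eval, pv_B_eval, ← pv_select]
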